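-- pv_equiv track=rewrite | github.com/koii-network/prometheus-beta | src/arithmetic_progression.py | has_arithmetic_progression
-- ===== SOURCE A (Python) =====
-- def has_arithmetic_progression(arr):
--     """
--     Determine if any three consecutive numbers in the array form an arithmetic progression.
--
--     An arithmetic progression is a sequence of numbers where the difference
--     between consecutive terms is constant.
--
--     Args:
--         arr (list): A list of positive integers.
--
--     Returns:
--         bool: True if any three consecutive numbers form an arithmetic progression,
--               False otherwise.
--
--     Raises:
--         ValueError: If the input is not a list or contains non-positive integers.
--
--     Examples:
--         >>> has_arithmetic_progression([1, 2, 3, 4, 5])  # True (1,2,3 or 2,3,4 or 3,4,5)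
--         True
--         >>> has_arithmetic_progression([1, 3, 5, 7, 9])  # True (1,3,5 or 3,5,7 or 5,7,9)
--         True
--         >>> has_arithmetic_progression([1, 2, 4, 8, 16])  # False
--         False
--         >>> has_arithmetic_progression([])  # False (too few elements)
--         False
--     """
--     # Validate input
--     if not isinstance(arr, list):
--         raise ValueError("Input must be a list")
--
--     # Check for non-positive integers or non-integers
--     if any(not isinstance(x, int) or x <= 0 for x in arr):
--         raise ValueError("All elements must be positive integers")
--
--     # Not enough elements to form a progression
--     if len(arr) < 3:
--         return False
--
--     # Check every consecutive triplet
--     for i in range(len(arr) - 2):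
--         # Check if the three consecutive numbers form an arithmetic progression
--         # An arithmetic progression means b - a = c - b
--         a, b, c = arr[i], arr[i+1], arr[i+2]
--         if b - a == c - b:
--             return True
--
--     return False
-- ===== SOURCE B (Python) =====
-- def has_arithmetic_progression(arr):
--     # Validate input (same contract as the original)
--     if not isinstance(arr, list):
--         raise ValueError("Input must be a list")
--     if any(not isinstance(x, int) or x <= 0 for x in arr):
--         raise ValueError("All elements must be positive integers")
--
--     # Divide and conquer: a consecutive triplet of arr lies entirely inside
--     # the left half extended by 2 elements of overlap, or inside the right half;
--     # recurse on both (O(log n) depth), solving length-3 segments directly.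
--     def dc(seg):
--         n = len(seg)
--         if n < 3:
--             return False
--         if n == 3:
--             return seg[1] - seg[0] == seg[2] - seg[1]
--         if n == 4:
--             return seg[1] - seg[0] == seg[2] - seg[1] or seg[2] - seg[1] == seg[3] - seg[2]
--         mid = n // 2
--         return dc(seg[:mid + 2]) or dc(seg[mid:])
--
--     return dc(arr)
-- ===== Notes on version B (the rewrite author's own statement) =====
-- stated objective: alternative
-- what changed: Replaced A's linear indexed scan over consecutive triplets by a divide-and-conquer recursion: split the list at the midpoint into the left half plus a 2-element overlap and the right half, recurse on both, and solve length-3 segments directly; correct because every consecutive triplet lies wholly in one of the two overlapping halves.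
import Mathlib
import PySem

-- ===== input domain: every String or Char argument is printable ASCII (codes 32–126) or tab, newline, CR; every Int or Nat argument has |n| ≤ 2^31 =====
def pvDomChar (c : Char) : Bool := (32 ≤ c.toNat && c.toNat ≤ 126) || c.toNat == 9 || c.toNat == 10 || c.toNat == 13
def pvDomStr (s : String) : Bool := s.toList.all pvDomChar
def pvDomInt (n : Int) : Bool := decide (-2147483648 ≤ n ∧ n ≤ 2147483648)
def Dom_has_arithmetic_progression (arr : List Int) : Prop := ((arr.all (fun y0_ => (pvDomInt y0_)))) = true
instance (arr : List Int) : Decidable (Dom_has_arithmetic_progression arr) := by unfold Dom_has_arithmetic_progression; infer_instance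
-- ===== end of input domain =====

-- B replaces A's linear indexed triplet scan by a divide-and-conquer recursion over overlapping
-- halves with direct length-3/4 base cases (alternative decomposition, no speed claim).


-- ===== PORT A =====
-- Python A raises ValueError when some element is ≤ 0; that validation is excluded by Pre_ below.
-- Inside Pre_ A proceeds: len<3 guard, then an indexed scan over every consecutive triplet
-- (early `return True` = List.any over the index range).
def has_arithmetic_progression (arr : List Int) : Bool :=
  if arr.length < 3 then false
  else (PySem.List.pyRange 0 ((arr.length : Int) - 2) 1).any (fun i =>
    let a := PySem.List.pyGetD arr i 0
    let b := PySem.List.pyGetD arr (i+1) 0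
    let c := PySem.List.pyGetD arr (i+2) 0
    b - a == c - b)

-- ===== PORT B =====
-- B's inner `dc`: slices seg[:mid+2] / seg[mid:] have nonnegative in-range bounds, so they are
-- exactly List.take / List.drop.
def dcAP (seg : List Int) : Bool :=
  if seg.length < 3 then false
  else if seg.length = 3 then
    match seg with
    | a :: b :: c :: _ => b - a == c - b
    | _ => false
  else if seg.length = 4 then
    match seg with
    | a :: b :: c :: d :: _ => (b - a == c - b) || (c - b == d - c)
    | _ => false
  else
    dcAP (seg.take (seg.length / 2 + 2)) || dcAP (seg.drop (seg.length / 2))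
termination_by seg.length
decreasing_by all_goals simp [List.length_take, List.length_drop]; omega

-- B (same validation as A, excluded by Pre_) returns dc(arr).
def has_arithmetic_progression_alt (arr : List Int) : Bool := dcAP arr

-- ===== PRECONDITION & SPEC =====
-- Pre_ excludes exactly the lists with a non-positive element, on which Python A raises ValueError.
def Pre_has_arithmetic_progression (arr : List Int) : Prop := ∀ x ∈ arr, 0 < x
instance (arr : List Int) : Decidable (Pre_has_arithmetic_progression arr) := by unfold Pre_has_arithmetic_progression; infer_instance
def pvWitness_has_arithmetic_progression : List Int := [1, 2, 3]

def Spec_has_arithmetic_progression (arr : List Int) (out : Bool) : Prop := out = has_arithmetic_progression_alt arr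
instance (arr : List Int) (out : Bool) : Decidable (Spec_has_arithmetic_progression arr out) := by unfold Spec_has_arithmetic_progression; infer_instance

-- ===== CLAIM (what is proved, stated in full; the proofs are below) =====
def Claim_equal_has_arithmetic_progression : Prop := ∀ (arr : List Int), Dom_has_arithmetic_progression arr → Pre_has_arithmetic_progression arr → Spec_has_arithmetic_progression arr (has_arithmetic_progression arr)

-- ===== LEMMAS AND PROOFS =====

-- Both programs decide the same property: some consecutive triplet has equal differences.
def TripleAt (seg : List Int) : Prop := ∃ k : Nat, ∃ h : k + 2 < seg.length,
  seg[k+1]'(by omega) - seg[k]'(by omega) = seg[k+2]'h - seg[k+1]'(by omega)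

-- B is true iff some consecutive triplet has equal differences (strong induction on length).
theorem dc_iff (seg : List Int) : dcAP seg = true ↔ TripleAt seg := by
  induction seg using dcAP.induct with
  | case1 seg h3 =>
    rw [dcAP.eq_def, if_pos h3]
    simp [TripleAt]; intro k hk; omega
  | case2 a b c rest h3 h4 =>
    have hr : rest = [] := by
      rcases rest with _ | ⟨x, t⟩
      · rfl
      · exfalso; simp [List.length_cons] at h4
    subst hr
    rw [dcAP]
    simp [TripleAt]
    constructor
    · intro he; exact ⟨0, by omega, by simpa using he⟩
    · rintro ⟨k, hk, he⟩
      have : k = 0 := by omega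
      subst this; simpa using he
  | case3 x h3 h4 hc =>
    exfalso
    rcases x with _ | ⟨a, _ | ⟨b, _ | ⟨c, t⟩⟩⟩ <;> simp_all
  | case4 a b c d rest h3 h4 hm =>
    have hr : rest = [] := by
      rcases rest with _ | ⟨x, t⟩
      · rfl
      · exfalso; simp [List.length_cons] at hm
    subst hr
    rw [dcAP]
    simp [TripleAt]
    constructor
    · rintro (he | he)
      · exact ⟨0, by omega, by simpa using he⟩
      · exact ⟨1, by omega, by simpa using he⟩
    · rintro ⟨k, hk, he⟩
      have hk2 : k < 2 := by omega
      interval_cases k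
      · exact Or.inl (by simpa using he)
      · exact Or.inr (by simpa using he)
  | case5 x h3 h4 hm hc =>
    exfalso
    rcases x with _ | ⟨a, _ | ⟨b, _ | ⟨c, _ | ⟨d, t⟩⟩⟩⟩ <;> simp_all
  | case6 seg h3 h4 hm ih1 ih2 =>
    rw [dcAP.eq_def, if_neg h3, if_neg h4, if_neg hm]
    have hn5 : 5 ≤ seg.length := by omega
    set n := seg.length with hn
    set mid := n / 2 with hmid
    have hmid2 : mid + 2 ≤ n := by omega
    have htl : (List.take (mid + 2) seg).length = mid + 2 := by
      rw [List.length_take]; omega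
    have hdl : (List.drop mid seg).length = n - mid := by
      rw [List.length_drop]
    rw [Bool.or_eq_true, ih1, ih2]
    unfold TripleAt
    constructor
    · rintro (⟨k, hk, he⟩ | ⟨k, hk, he⟩)
      · have hk' : k + 2 < mid + 2 := by rw [htl] at hk; exact hk
        refine ⟨k, by omega, ?_⟩
        simpa [List.getElem_take] using he
      · have hk' : k + 2 < n - mid := by rw [hdl] at hk; exact hk
        refine ⟨mid + k, by omega, ?_⟩
        have e1 : mid + (k + 1) = mid + k + 1 := by omega
        have e2 : mid + (k + 2) = mid + k + 2 := by omega
        simpa [List.getElem_drop, e1, e2] using he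
    · rintro ⟨k, hk, he⟩
      by_cases hkm : k < mid
      · left
        refine ⟨k, by rw [htl]; omega, ?_⟩
        simpa [List.getElem_take] using he
      · right
        refine ⟨k - mid, by rw [hdl]; omega, ?_⟩
        have e0 : mid + (k - mid) = k := by omega
        have e1 : mid + (k - mid + 1) = k + 1 := by omega
        have e2 : mid + (k - mid + 2) = k + 2 := by omega
        simpa [List.getElem_drop, e0, e1, e2] using he

-- A is true iff some consecutive triplet has equal differences.
theorem a_iff (arr : List Int) : has_arithmetic_progression arr = true ↔ TripleAt arr := by
  unfold TripleAt
  by_cases h3 : arr.length < 3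
  · simp [has_arithmetic_progression, h3]
    intro k hk
    omega
  · simp [has_arithmetic_progression, h3, List.any_eq_true, PySem.List.mem_pyRange_one]
    constructor
    · rintro ⟨x, ⟨hx0, hx2⟩, he⟩
      refine ⟨x.toNat, by omega, ?_⟩
      rw [PySem.List.pyGetD_eq_getElem arr 0 hx0 (by omega),
          PySem.List.pyGetD_eq_getElem arr 0 (by omega) (by omega),
          PySem.List.pyGetD_eq_getElem arr 0 (by omega) (by omega)] at he
      have e1 : (x + 1).toNat = x.toNat + 1 := by omega
      have e2 : (x + 2).toNat = x.toNat + 2 := by omega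
      simpa [e1, e2] using he
    · rintro ⟨k, hk, he⟩
      refine ⟨(k : Int), ⟨by omega, by omega⟩, ?_⟩
      rw [PySem.List.pyGetD_eq_getElem arr 0 (by omega) (by omega),
          PySem.List.pyGetD_eq_getElem arr 0 (by omega) (by omega),
          PySem.List.pyGetD_eq_getElem arr 0 (by omega) (by omega)]
      have e1 : ((k : Int) + 1).toNat = k + 1 := by omega
      have e2 : ((k : Int) + 2).toNat = k + 2 := by omega
      simpa [e1, e2] using he

-- ===== VERDICT (by name: the statement is the Claim_ definition above) =====
theorem has_arithmetic_progression_spec : Claim_equal_has_arithmetic_progression := by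
  intro arr _ _
  unfold Spec_has_arithmetic_progression has_arithmetic_progression_alt
  have := (a_iff arr).trans (dc_iff arr).symm
  cases hA : has_arithmetic_progression arr <;> cases hB : dcAP arr <;> simp_all
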